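-- pv_equiv track=rewrite | github.com/NissanJonah/Algorithmic_trading_PCA | PCA manifolds/PCA_strategy_fixed_backtesting.py | contiguous_runs_length
-- ===== SOURCE A (Python) =====
-- def contiguous_runs_length(seq, match_val):
--     runs = []
--     cur = 0
--     for v in seq:
--         if v == match_val:
--             cur += 1
--         else:
--             if cur > 0:
--                 runs.append(cur)
--             cur = 0
--     if cur > 0:
--         runs.append(cur)
--     return runs
-- ===== SOURCE B (Python) =====
-- from itertools import groupby
--
--
-- def contiguous_runs_length(seq, match_val):
--     return [sum(1 for _ in g)
--             for k, g in groupby(seq, key=lambda v: v == match_val)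
--             if k]
-- ===== Notes on version B (the rewrite author's own statement) =====
-- stated objective: idiomatic
-- what changed: Replaces the explicit running counter with its else-branch reset and post-loop flush by an itertools.groupby pass keyed on equality with match_val, keeping the lengths of the True groups via a comprehension.
import Mathlib
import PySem

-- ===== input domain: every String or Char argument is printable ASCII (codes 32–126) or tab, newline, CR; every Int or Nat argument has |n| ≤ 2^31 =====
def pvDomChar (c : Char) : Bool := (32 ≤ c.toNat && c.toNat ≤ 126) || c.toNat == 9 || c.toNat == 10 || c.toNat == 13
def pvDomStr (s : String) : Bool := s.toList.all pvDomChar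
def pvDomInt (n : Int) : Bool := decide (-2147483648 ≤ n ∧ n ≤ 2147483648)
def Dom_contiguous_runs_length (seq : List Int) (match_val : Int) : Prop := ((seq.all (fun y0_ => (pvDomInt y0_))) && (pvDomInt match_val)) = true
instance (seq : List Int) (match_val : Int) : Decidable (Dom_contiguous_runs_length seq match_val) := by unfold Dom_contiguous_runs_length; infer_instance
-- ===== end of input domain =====

-- B replaces A's running counter / reset / post-loop flush by a groupby-style
-- grouping pass keyed on equality with match_val, keeping lengths of the True groups (idiomatic).


-- ===== PORT A =====
-- A's for-loop over seq with state (runs, cur); the trailing flush is the [] case.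
def pvAGo (m : Int) : List Int → List Int → Int → List Int
  | [], runs, cur => if cur > 0 then runs ++ [cur] else runs
  | v :: rest, runs, cur =>
      if v = m then pvAGo m rest runs (cur + 1)
      else pvAGo m rest (if cur > 0 then runs ++ [cur] else runs) 0

def contiguous_runs_length (seq : List Int) (match_val : Int) : List Int :=
  pvAGo match_val seq [] 0

-- ===== PORT B =====
-- itertools.groupby(seq, key=λ v, v == match_val): consecutive (key, group length) pairs.
def pvGroups (m : Int) : List Int → List (Bool × Int)
  | [] => []
  | v :: rest =>
      let k := decide (v = m)
      let g := rest.takeWhile (fun w => decide (w = m) == k)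
      let rest' := rest.dropWhile (fun w => decide (w = m) == k)
      (k, (g.length : Int) + 1) :: pvGroups m rest'
termination_by l => l.length
decreasing_by
  simp only [List.length_cons]
  have := List.length_dropWhile_le (fun w => decide (w = m) == decide (v = m)) rest
  omega

-- the comprehension: lengths of the groups whose key is True
def contiguous_runs_length_alt (seq : List Int) (match_val : Int) : List Int :=
  ((pvGroups match_val seq).filter (fun p => p.1)).map (fun p => p.2)

-- ===== PRECONDITION & SPEC =====
def Spec_contiguous_runs_length (seq : List Int) (match_val : Int) (out : List Int) : Prop := out = contiguous_runs_length_alt seq match_val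
instance (seq : List Int) (match_val : Int) (out : List Int) : Decidable (Spec_contiguous_runs_length seq match_val out) := by unfold Spec_contiguous_runs_length; infer_instance

-- ===== CLAIM (what is proved, stated in full; the proofs are below) =====
def Claim_equal_contiguous_runs_length : Prop := ∀ (seq : List Int) (match_val : Int), Dom_contiguous_runs_length seq match_val → Spec_contiguous_runs_length seq match_val (contiguous_runs_length seq match_val)

-- ===== LEMMAS AND PROOFS =====

-- the runs accumulator is a pure prefix
lemma pvAGo_acc (m : Int) : ∀ (seq : List Int) (runs : List Int) (cur : Int),
    pvAGo m seq runs cur = runs ++ pvAGo m seq [] cur := by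
  intro seq
  induction seq with
  | nil => intro runs cur; simp [pvAGo]; split <;> simp
  | cons v rest ih =>
    intro runs cur
    simp only [pvAGo]
    split
    · exact ih runs (cur + 1)
    · split
      · rw [ih (runs ++ [cur]) 0]
        simp only [List.nil_append]
        rw [ih [cur] 0]
        simp
      · exact ih runs 0

-- a block of matches just bumps the counter
lemma pvAGo_run (m : Int) : ∀ (g rest : List Int) (runs : List Int) (cur : Int),
    (∀ x ∈ g, x = m) → pvAGo m (g ++ rest) runs cur = pvAGo m rest runs (cur + g.length) := by
  intro g
  induction g with
  | nil => intro rest runs cur _; simp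
  | cons x t ih =>
    intro rest runs cur h
    have hx : x = m := h x (by simp)
    simp only [List.cons_append, pvAGo, if_pos hx]
    rw [ih rest runs (cur + 1) (fun y hy => h y (by simp [hy]))]
    congr 1
    simp only [List.length_cons]
    push_cast
    ring

lemma dropWhile_head_false {p : Int → Bool} : ∀ (l : List Int) (w : Int) (t : List Int),
    l.dropWhile p = w :: t → p w = false := by
  intro l
  induction l with
  | nil => intro w t h; simp [List.dropWhile] at h
  | cons x xs ih =>
    intro w t h
    by_cases hx : p x
    · rw [List.dropWhile_cons, if_pos hx] at h; exact ih w t h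
    · rw [List.dropWhile_cons, if_neg hx] at h
      cases h
      simpa using hx

-- a non-matching head is dropped by B too
lemma alt_cons_ne (m v : Int) (rest : List Int) (hv : ¬ v = m) :
    contiguous_runs_length_alt (v :: rest) m = contiguous_runs_length_alt rest m := by
  cases rest with
  | nil => simp [contiguous_runs_length_alt, pvGroups, hv]
  | cons w t =>
    by_cases hw : w = m
    · simp [contiguous_runs_length_alt, pvGroups, hv, hw, List.takeWhile, List.dropWhile]
    · simp [contiguous_runs_length_alt, pvGroups, hv, hw, List.takeWhile, List.dropWhile]

-- a matching head starts a True group of the maximal run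
lemma alt_cons_eq (m v : Int) (rest : List Int) (hv : v = m) :
    contiguous_runs_length_alt (v :: rest) m =
      (((rest.takeWhile (fun w => decide (w = m))).length : Int) + 1)
        :: contiguous_runs_length_alt (rest.dropWhile (fun w => decide (w = m))) m := by
  simp [contiguous_runs_length_alt, pvGroups, hv]

lemma main_lemma (m : Int) : ∀ (n : ℕ) (seq : List Int), seq.length ≤ n →
    pvAGo m seq [] 0 = contiguous_runs_length_alt seq m := by
  intro n
  induction n with
  | zero =>
    intro seq h
    have : seq = [] := List.eq_nil_of_length_eq_zero (Nat.le_zero.mp h)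
    subst this
    simp [pvAGo, contiguous_runs_length_alt, pvGroups]
  | succ n ih =>
    intro seq hlen
    cases seq with
    | nil => simp [pvAGo, contiguous_runs_length_alt, pvGroups]
    | cons v rest =>
      have hrn : rest.length ≤ n := by simpa using Nat.lt_succ_iff.mp (Nat.lt_of_lt_of_le (by simp) hlen)
      by_cases hv : v = m
      · -- matching head: consume the maximal run, then flush
        have hsplit : rest.takeWhile (fun w => decide (w = m)) ++ rest.dropWhile (fun w => decide (w = m)) = rest :=
          List.takeWhile_append_dropWhile
        have hgm : ∀ x ∈ rest.takeWhile (fun w => decide (w = m)), x = m := by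
          intro x hx
          simpa using List.mem_takeWhile_imp hx
        have hrl : (rest.dropWhile (fun w => decide (w = m))).length ≤ rest.length :=
          List.length_dropWhile_le _ _
        have hA : pvAGo m (v :: rest) [] 0
            = pvAGo m (rest.dropWhile (fun w => decide (w = m))) []
                (1 + (rest.takeWhile (fun w => decide (w = m))).length) := by
          simp only [pvAGo, if_pos hv, zero_add]
          rw [← hsplit, pvAGo_run m _ _ [] 1 hgm, hsplit]
        rw [hA, alt_cons_eq m v rest hv]
        cases hrc : rest.dropWhile (fun w => decide (w = m)) with
        | nil =>
          have hpos : (0:Int) < 1 + (rest.takeWhile (fun w => decide (w = m))).length := by positivity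
          simp [pvAGo, contiguous_runs_length_alt, pvGroups, hpos]
          ring
        | cons w t =>
          have hw : ¬ w = m := by
            have := dropWhile_head_false rest w t hrc
            simpa using this
          have hpos : (0:Int) < 1 + (rest.takeWhile (fun w => decide (w = m))).length := by positivity
          simp only [pvAGo, if_neg hw, if_pos hpos, List.nil_append]
          rw [pvAGo_acc]
          have ht : t.length ≤ n := by
            rw [hrc] at hrl
            simp only [List.length_cons] at hrl
            omega
          rw [ih t ht, ← alt_cons_ne m w t hw]
          simp
          ring
      · -- non-matching head with cur = 0: both sides drop it
        simp only [pvAGo, if_neg hv]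
        norm_num
        rw [ih rest hrn]
        exact (alt_cons_ne m v rest hv).symm

-- ===== VERDICT (by name: the statement is the Claim_ definition above) =====
theorem contiguous_runs_length_spec : Claim_equal_contiguous_runs_length := by
  intro seq m _
  unfold Spec_contiguous_runs_length contiguous_runs_length
  exact main_lemma m seq.length seq le_rfl
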